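-- pv_equiv track=rewrite | github.com/harshadasari451/Hypernetworks-on-semantic-Segmentation | get_boundary_pixels.py | get_boundary_pixels
-- ===== SOURCE A (Python) =====
-- def get_boundary_pixels(x, y, image_size, patch_size):
--     """
--     Get the boundary pixels around a patch centered at (x, y).
--
--     Args:
--         x (int): The x-coordinate of the center pixel.
--         y (int): The y-coordinate of the center pixel.
--         image_size (tuple): The size of the image as (width, height).
--         patch_size (int): The size of the patch
--
--     Returns:
--         list: A list of (x, y) tuples representing the boundary pixels.
--     """
--     width, height = image_size
--     boundary_pixels = []
--
--     # Define the patch size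
--     patch_size = patch_size
--     half_patch = patch_size // 2
--
--     # Define the boundary limits (1 pixel outside the patch)
--     min_x = x - half_patch - 1
--     max_x = x + half_patch + 1
--     min_y = y - half_patch - 1
--     max_y = y + half_patch + 1
--
--     # Iterate over the boundary pixels
--     for i in range(min_x, max_x + 1):
--         for j in range(min_y, max_y + 1):
--             # Skip pixels inside the patch
--             if (i >= x - half_patch and i <= x + half_patch) and (j >= y - half_patch and j <= y + half_patch):
--                 continue
--             # Include only valid pixels within the image boundaries
--             if 0 <= i < width and 0 <= j < height:
--                 boundary_pixels.append((i, j))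
--
--     return boundary_pixels
-- ===== SOURCE B (Python) =====
-- def get_boundary_pixels(x, y, image_size, patch_size):
--     """Emit only the perimeter ring directly (same i,j order as a full scan),
--     instead of scanning the whole (patch+2)^2 square."""
--     width, height = image_size
--     half_patch = patch_size // 2
--     min_x = x - half_patch - 1
--     max_x = x + half_patch + 1
--     min_y = y - half_patch - 1
--     max_y = y + half_patch + 1
--
--     lo_j = max(min_y, 0)
--     hi_j = min(max_y, height - 1)
--     out = []
--     for i in range(max(min_x, 0), min(max_x, width - 1) + 1):
--         if x - half_patch <= i <= x + half_patch:
--             # interior row: only the two ring columns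
--             if 0 <= min_y < height:
--                 out.append((i, min_y))
--             if 0 <= max_y < height:
--                 out.append((i, max_y))
--         else:
--             # top/bottom ring row: the whole clipped row
--             out.extend((i, j) for j in range(lo_j, hi_j + 1))
--     return out
-- ===== Notes on version B (the rewrite author's own statement) =====
-- stated objective: faster
-- what changed: B emits the ring directly: it walks only the clipped rows of the (patch+2)-wide band, producing the full clipped row for the top/bottom ring rows and just the two ring columns for interior rows, instead of scanning every cell of the square and skipping the interior.
import Mathlib
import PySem

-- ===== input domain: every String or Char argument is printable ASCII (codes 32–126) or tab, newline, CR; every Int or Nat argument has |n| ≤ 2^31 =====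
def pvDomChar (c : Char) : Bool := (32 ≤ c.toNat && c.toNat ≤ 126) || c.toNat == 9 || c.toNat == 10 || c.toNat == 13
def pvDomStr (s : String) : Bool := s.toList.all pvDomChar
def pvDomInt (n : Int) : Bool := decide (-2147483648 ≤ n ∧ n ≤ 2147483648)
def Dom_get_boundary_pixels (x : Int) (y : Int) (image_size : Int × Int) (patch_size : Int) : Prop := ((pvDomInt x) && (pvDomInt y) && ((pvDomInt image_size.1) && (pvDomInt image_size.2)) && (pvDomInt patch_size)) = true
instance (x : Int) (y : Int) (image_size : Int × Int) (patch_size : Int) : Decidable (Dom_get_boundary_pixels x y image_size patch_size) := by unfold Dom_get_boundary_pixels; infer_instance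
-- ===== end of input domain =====

-- B emits the boundary ring directly (clipped ring rows + two ring columns per interior row)
-- instead of A's full scan of the (patch+2)^2 square; same return value, O(patch) vs O(patch^2).

-- ===== PORT A =====
def get_boundary_pixels (x : Int) (y : Int) (image_size : Int × Int) (patch_size : Int) : List (Int × Int) :=
  let width := image_size.1
  let height := image_size.2
  let half_patch := PySem.Int.floordiv patch_size 2
  let min_x := x - half_patch - 1
  let max_x := x + half_patch + 1
  let min_y := y - half_patch - 1
  let max_y := y + half_patch + 1
  (PySem.List.pyRange min_x (max_x + 1)).foldl (fun acc i =>
    (PySem.List.pyRange min_y (max_y + 1)).foldl (fun acc j =>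
      if (i ≥ x - half_patch ∧ i ≤ x + half_patch) ∧ (j ≥ y - half_patch ∧ j ≤ y + half_patch) then
        acc
      else if 0 ≤ i ∧ i < width ∧ 0 ≤ j ∧ j < height then
        acc ++ [(i, j)]
      else acc) acc) []

-- ===== PORT B =====
def get_boundary_pixels_alt (x : Int) (y : Int) (image_size : Int × Int) (patch_size : Int) : List (Int × Int) :=
  let width := image_size.1
  let height := image_size.2
  let half_patch := PySem.Int.floordiv patch_size 2
  let min_x := x - half_patch - 1
  let max_x := x + half_patch + 1
  let min_y := y - half_patch - 1
  let max_y := y + half_patch + 1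
  let lo_j := max min_y 0
  let hi_j := min max_y (height - 1)
  (PySem.List.pyRange (max min_x 0) (min max_x (width - 1) + 1)).foldl (fun out i =>
    if x - half_patch ≤ i ∧ i ≤ x + half_patch then
      (out ++ (if 0 ≤ min_y ∧ min_y < height then [(i, min_y)] else []))
          ++ (if 0 ≤ max_y ∧ max_y < height then [(i, max_y)] else [])
    else
      out ++ (PySem.List.pyRange lo_j (hi_j + 1)).map (fun j => (i, j))) []

-- ===== PRECONDITION & SPEC =====
def Spec_get_boundary_pixels (x : Int) (y : Int) (image_size : Int × Int) (patch_size : Int) (out : List (Int × Int)) : Prop := out = get_boundary_pixels_alt x y image_size patch_size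
instance (x : Int) (y : Int) (image_size : Int × Int) (patch_size : Int) (out : List (Int × Int)) : Decidable (Spec_get_boundary_pixels x y image_size patch_size out) := by unfold Spec_get_boundary_pixels; infer_instance

-- ===== CLAIM (what is proved, stated in full; the proofs are below) =====
def Claim_equal_get_boundary_pixels : Prop := ∀ (x : Int) (y : Int) (image_size : Int × Int) (patch_size : Int), Dom_get_boundary_pixels x y image_size patch_size → Spec_get_boundary_pixels x y image_size patch_size (get_boundary_pixels x y image_size patch_size)

-- ===== LEMMAS AND PROOFS =====

lemma pyRange_nil {a b : Int} (h : b ≤ a) : PySem.List.pyRange a b = [] := by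
  simp [PySem.List.pyRange]; omega

-- clamping a [0, w) filter on a step-1 range into the range's endpoints
lemma clamp_aux {γ : Type} (F : Int → List γ) (w : Int) :
    ∀ (n : Nat) (a b : Int), b - a ≤ (n : Int) →
      (PySem.List.pyRange a b).flatMap (fun i => if 0 ≤ i ∧ i < w then F i else [])
        = (PySem.List.pyRange (max a 0) (min b w)).flatMap F := by
  intro n
  induction n with
  | zero =>
    intro a b h
    rw [pyRange_nil (by omega), pyRange_nil (by omega)]; simp
  | succ m ih =>
    intro a b h
    by_cases hab : b ≤ a
    · rw [pyRange_nil hab, pyRange_nil (by omega)]; simp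
    · push Not at hab
      rw [PySem.List.pyRange_one_cons hab, List.flatMap_cons,
          ih (a + 1) b (by omega)]
      by_cases hcl : 0 ≤ a ∧ a < w
      · have h1 : max a 0 = a := by omega
        have h2 : max (a + 1) 0 = a + 1 := by omega
        have h3 : a < min b w := by omega
        rw [if_pos hcl, h1, h2, PySem.List.pyRange_one_cons h3, List.flatMap_cons]
      · rw [if_neg hcl, List.nil_append]
        by_cases ha0 : a < 0
        · have h1 : max a 0 = 0 := by omega
          have h2 : max (a + 1) 0 = 0 := by omega
          rw [h1, h2]
        · have hw : w ≤ a := by omega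
          rw [pyRange_nil (by omega), pyRange_nil (by omega)]

lemma clamp_flatMap {γ : Type} (F : Int → List γ) (w a b : Int) :
    (PySem.List.pyRange a b).flatMap (fun i => if 0 ≤ i ∧ i < w then F i else [])
      = (PySem.List.pyRange (max a 0) (min b w)).flatMap F :=
  clamp_aux F w (b - a).toNat a b (by omega)

-- one row of A, as a flatMap
def gA (x y hp w h i : Int) : Int → List (Int × Int) := fun j =>
  if (i ≥ x - hp ∧ i ≤ x + hp) ∧ (j ≥ y - hp ∧ j ≤ y + hp) then []
  else if 0 ≤ i ∧ i < w ∧ 0 ≤ j ∧ j < h then [(i, j)] else []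

def rowA (x y hp w h : Int) (i : Int) : List (Int × Int) :=
  (PySem.List.pyRange (y - hp - 1) (y + hp + 1 + 1)).flatMap (gA x y hp w h i)

def rowB (x y hp h : Int) (i : Int) : List (Int × Int) :=
  if x - hp ≤ i ∧ i ≤ x + hp then
    (if 0 ≤ y - hp - 1 ∧ y - hp - 1 < h then [(i, y - hp - 1)] else [])
      ++ (if 0 ≤ y + hp + 1 ∧ y + hp + 1 < h then [(i, y + hp + 1)] else [])
  else
    (PySem.List.pyRange (max (y - hp - 1) 0) (min (y + hp + 1) (h - 1) + 1)).map (fun j => (i, j))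

lemma foldl_abs {α γ : Type} (l : List α) (acc : List γ) (step : List γ → α → List γ)
    (q : α → List γ) (hstep : ∀ a j, step a j = a ++ q j) :
    l.foldl step acc = acc ++ l.flatMap q := by
  have hs : step = fun a j => a ++ q j := by funext a j; exact hstep a j
  rw [hs, PySem.List.foldl_append_eq_flatMap]

lemma flatMap_congr' {α β : Type} (l : List α) (f g : α → List β)
    (h : ∀ a ∈ l, f a = g a) : l.flatMap f = l.flatMap g := by
  simp only [List.flatMap_def]; rw [List.map_congr_left h]

lemma flatMap_singleton_map {α β : Type} (l : List α) (f : α → β) :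
    l.flatMap (fun a => [f a]) = l.map f := by
  induction l with
  | nil => rfl
  | cons a t ih => simp [List.flatMap_cons, ih]

lemma A_eq (x y w h p : Int) :
    get_boundary_pixels x y (w, h) p
      = (PySem.List.pyRange (x - PySem.Int.floordiv p 2 - 1) (x + PySem.Int.floordiv p 2 + 1 + 1)).flatMap
          (rowA x y (PySem.Int.floordiv p 2) w h) := by
  have main : ∀ hp : Int,
      (PySem.List.pyRange (x - hp - 1) (x + hp + 1 + 1)).foldl
        (fun acc i =>
          (PySem.List.pyRange (y - hp - 1) (y + hp + 1 + 1)).foldl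
            (fun acc j =>
              if (i ≥ x - hp ∧ i ≤ x + hp) ∧ (j ≥ y - hp ∧ j ≤ y + hp) then acc
              else if 0 ≤ i ∧ i < w ∧ 0 ≤ j ∧ j < h then acc ++ [(i, j)] else acc) acc) []
        = (PySem.List.pyRange (x - hp - 1) (x + hp + 1 + 1)).flatMap (rowA x y hp w h) := by
    intro hp
    have inner : ∀ (a : List (Int × Int)) (i : Int),
        (PySem.List.pyRange (y - hp - 1) (y + hp + 1 + 1)).foldl
          (fun acc j =>
            if (i ≥ x - hp ∧ i ≤ x + hp) ∧ (j ≥ y - hp ∧ j ≤ y + hp) then acc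
            else if 0 ≤ i ∧ i < w ∧ 0 ≤ j ∧ j < h then acc ++ [(i, j)] else acc) a
          = a ++ rowA x y hp w h i := by
      intro a i
      simp only [rowA]
      apply foldl_abs
      intro a' j
      simp only [gA]
      split_ifs <;> simp
    rw [foldl_abs _ _ _ (rowA x y hp w h) (fun a i => inner a i), List.nil_append]
  exact main (PySem.Int.floordiv p 2)

lemma B_eq (x y w h p : Int) :
    get_boundary_pixels_alt x y (w, h) p
      = (PySem.List.pyRange (max (x - PySem.Int.floordiv p 2 - 1) 0)
            (min (x + PySem.Int.floordiv p 2 + 1) (w - 1) + 1)).flatMap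
          (rowB x y (PySem.Int.floordiv p 2) h) := by
  have main : ∀ hp : Int,
      (PySem.List.pyRange (max (x - hp - 1) 0) (min (x + hp + 1) (w - 1) + 1)).foldl
        (fun out i =>
          if x - hp ≤ i ∧ i ≤ x + hp then
            (out ++ (if 0 ≤ y - hp - 1 ∧ y - hp - 1 < h then [(i, y - hp - 1)] else []))
              ++ (if 0 ≤ y + hp + 1 ∧ y + hp + 1 < h then [(i, y + hp + 1)] else [])
          else
            out ++ (PySem.List.pyRange (max (y - hp - 1) 0) (min (y + hp + 1) (h - 1) + 1)).map
              (fun j => (i, j))) []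
        = (PySem.List.pyRange (max (x - hp - 1) 0) (min (x + hp + 1) (w - 1) + 1)).flatMap
            (rowB x y hp h) := by
    intro hp
    rw [foldl_abs _ _ _ (rowB x y hp h) ?_, List.nil_append]
    intro a i
    simp only [rowB]
    by_cases hc : x - hp ≤ i ∧ i ≤ x + hp
    · rw [if_pos hc, if_pos hc, List.append_assoc]
    · rw [if_neg hc, if_neg hc]
  exact main (PySem.Int.floordiv p 2)

lemma row_eq (x y w h hp i : Int) (hi : 0 ≤ i) (hiw : i < w) :
    rowA x y hp w h i = rowB x y hp h i := by
  by_cases hint : x - hp ≤ i ∧ i ≤ x + hp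
  · have hp0 : 0 ≤ hp := by omega
    simp only [rowA, rowB, if_pos hint]
    have hd1 : PySem.List.pyRange (y - hp - 1) (y + hp + 1 + 1)
        = (y - hp - 1) :: PySem.List.pyRange (y - hp) (y + hp + 1 + 1) := by
      rw [PySem.List.pyRange_one_cons (by omega), show y - hp - 1 + 1 = y - hp from by ring]
    have hd2 : PySem.List.pyRange (y - hp) (y + hp + 1 + 1)
        = PySem.List.pyRange (y - hp) (y + hp + 1) ++ [y + hp + 1] :=
      PySem.List.pyRange_one_succ_right (by omega)
    have hmid : (PySem.List.pyRange (y - hp) (y + hp + 1)).flatMap (gA x y hp w h i) = [] := by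
      apply List.flatMap_eq_nil_iff.mpr
      intro j hj
      rw [PySem.List.mem_pyRange_one] at hj
      simp only [gA]
      rw [if_pos ⟨⟨hint.1, hint.2⟩, ⟨hj.1, by omega⟩⟩]
    have hfirst : gA x y hp w h i (y - hp - 1)
        = (if 0 ≤ y - hp - 1 ∧ y - hp - 1 < h then [(i, y - hp - 1)] else []) := by
      simp only [gA]
      rw [if_neg (by omega :
        ¬((i ≥ x - hp ∧ i ≤ x + hp) ∧ (y - hp - 1 ≥ y - hp ∧ y - hp - 1 ≤ y + hp)))]
      by_cases hjh : 0 ≤ y - hp - 1 ∧ y - hp - 1 < h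
      · rw [if_pos ⟨hi, hiw, hjh.1, hjh.2⟩, if_pos hjh]
      · rw [if_neg (by omega), if_neg hjh]
    have hlast : gA x y hp w h i (y + hp + 1)
        = (if 0 ≤ y + hp + 1 ∧ y + hp + 1 < h then [(i, y + hp + 1)] else []) := by
      simp only [gA]
      rw [if_neg (by omega :
        ¬((i ≥ x - hp ∧ i ≤ x + hp) ∧ (y + hp + 1 ≥ y - hp ∧ y + hp + 1 ≤ y + hp)))]
      by_cases hjh : 0 ≤ y + hp + 1 ∧ y + hp + 1 < h
      · rw [if_pos ⟨hi, hiw, hjh.1, hjh.2⟩, if_pos hjh]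
      · rw [if_neg (by omega), if_neg hjh]
    rw [hd1, hd2]
    simp only [List.flatMap_cons, List.flatMap_append, List.flatMap_nil, List.append_nil]
    rw [hmid, hfirst, hlast, List.nil_append]
  · simp only [rowA, rowB, if_neg hint]
    have hg : gA x y hp w h i = fun j => if 0 ≤ j ∧ j < h then [(i, j)] else [] := by
      funext j
      simp only [gA]
      rw [if_neg (fun hc => hint ⟨hc.1.1, hc.1.2⟩)]
      by_cases hjh : 0 ≤ j ∧ j < h
      · rw [if_pos ⟨hi, hiw, hjh.1, hjh.2⟩, if_pos hjh]
      · rw [if_neg (by omega), if_neg hjh]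
    rw [hg, clamp_flatMap (fun j => [(i, j)]) h,
        show min (y + hp + 1 + 1) h = min (y + hp + 1) (h - 1) + 1 from by omega,
        flatMap_singleton_map]

lemma rows_eq (x y w h hp : Int) :
    (PySem.List.pyRange (x - hp - 1) (x + hp + 1 + 1)).flatMap (rowA x y hp w h)
      = (PySem.List.pyRange (max (x - hp - 1) 0) (min (x + hp + 1) (w - 1) + 1)).flatMap
          (rowB x y hp h) := by
  have hguard : (fun i => rowA x y hp w h i)
      = fun i => if 0 ≤ i ∧ i < w then rowA x y hp w h i else [] := by
    funext i
    by_cases hi : 0 ≤ i ∧ i < w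
    · rw [if_pos hi]
    · rw [if_neg hi]
      simp only [rowA]
      apply List.flatMap_eq_nil_iff.mpr
      intro j _
      simp only [gA]
      by_cases hc : (i ≥ x - hp ∧ i ≤ x + hp) ∧ (j ≥ y - hp ∧ j ≤ y + hp)
      · rw [if_pos hc]
      · rw [if_neg hc, if_neg (by omega)]
  calc (PySem.List.pyRange (x - hp - 1) (x + hp + 1 + 1)).flatMap (rowA x y hp w h)
      = (PySem.List.pyRange (x - hp - 1) (x + hp + 1 + 1)).flatMap
          (fun i => if 0 ≤ i ∧ i < w then rowA x y hp w h i else []) := by rw [← hguard]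
    _ = (PySem.List.pyRange (max (x - hp - 1) 0) (min (x + hp + 1 + 1) w)).flatMap
          (rowA x y hp w h) := clamp_flatMap (rowA x y hp w h) w _ _
    _ = (PySem.List.pyRange (max (x - hp - 1) 0) (min (x + hp + 1) (w - 1) + 1)).flatMap
          (rowA x y hp w h) := by rw [show min (x + hp + 1 + 1) w = min (x + hp + 1) (w - 1) + 1 from by omega]
    _ = (PySem.List.pyRange (max (x - hp - 1) 0) (min (x + hp + 1) (w - 1) + 1)).flatMap
          (rowB x y hp h) := by
        apply flatMap_congr'
        intro i hi
        rw [PySem.List.mem_pyRange_one] at hi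
        exact row_eq x y w h hp i (by omega) (by omega)

-- ===== VERDICT (by name: the statement is the Claim_ definition above) =====
theorem get_boundary_pixels_spec : Claim_equal_get_boundary_pixels := by
  intro x y im p _
  obtain ⟨w, h⟩ := im
  show get_boundary_pixels x y (w, h) p = get_boundary_pixels_alt x y (w, h) p
  rw [A_eq, B_eq]
  exact rows_eq x y w h (PySem.Int.floordiv p 2)
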